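-- pv_equiv track=rewrite | github.com/sureshfizzy/CineSync | MediaHub/utils/mediainfo/sonarr_utils.py | move_article_to_end
-- ===== SOURCE A (Python) =====
-- def move_article_to_end(title):
--     """
--     Move articles (The, A, An) from beginning to end
--
--     Args:
--         title: Original title
--
--     Returns:
--         Title with article moved to end
--     """
--     if not title:
--         return title
--
--     articles = ['The ', 'A ', 'An ']
--     for article in articles:
--         if title.startswith(article):
--             return f"{title[len(article):]}, {article.strip()}"
--
--     return title
-- ===== SOURCE B (Python) =====
-- def move_article_to_end(title):
--     if not title:
--         return title
--     parts = title.split(' ', 1)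
--     if len(parts) == 2 and parts[0] in ('The', 'A', 'An'):
--         return f"{parts[1]}, {parts[0]}"
--     return title
-- ===== Notes on version B (the rewrite author's own statement) =====
-- stated objective: idiomatic
-- what changed: Replaces A's loop over space-suffixed article prefixes (startswith + slice per article) by a single split on the first space (maxsplit 1) and a membership test on the first word.
import Mathlib
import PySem

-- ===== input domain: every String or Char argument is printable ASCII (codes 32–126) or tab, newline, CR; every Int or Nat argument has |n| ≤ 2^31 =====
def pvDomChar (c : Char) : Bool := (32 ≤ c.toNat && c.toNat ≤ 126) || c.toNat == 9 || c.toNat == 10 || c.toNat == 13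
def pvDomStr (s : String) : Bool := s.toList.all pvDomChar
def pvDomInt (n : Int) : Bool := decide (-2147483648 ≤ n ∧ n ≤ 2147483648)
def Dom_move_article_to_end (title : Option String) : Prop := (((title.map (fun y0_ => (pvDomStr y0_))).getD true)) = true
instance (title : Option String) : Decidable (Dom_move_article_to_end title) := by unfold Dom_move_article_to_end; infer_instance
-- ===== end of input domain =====

-- B replaces A's scan over prefixed article strings by one split on the first space (maxsplit 1) plus a membership test on the first word (idiomatic decomposition, same cost).

-- ===== PORT A =====
-- loop 'for article in articles: if title.startswith(article): return …'
def moveA_loop (t : String) : List String → Option String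
  | [] => some t
  | a :: rest =>
      if PySem.Str.startswith t a then
        some (String.ofList ((PySem.Str.slice t (some ((PySem.Str.len a : Int))) none).toList
              ++ (", ").toList ++ (PySem.Str.strip a).toList))
      else moveA_loop t rest

def move_article_to_end (title : Option String) : Option String :=
  match title with
  | none => none
  | some t =>
      if t = "" then some t
      else moveA_loop t ["The ", "A ", "An "]

-- ===== PORT B =====
def move_article_to_end_alt (title : Option String) : Option String :=
  match title with
  | none => none
  | some t =>
      if t = "" then some t
      else
        match PySem.Str.splitMax? t " " 1 with
        | some [first, rest] =>
            if first = "The" ∨ first = "A" ∨ first = "An" then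
              some (String.ofList (rest.toList ++ (", ").toList ++ first.toList))
            else some t
        | _ => some t

-- ===== PRECONDITION & SPEC =====
def Spec_move_article_to_end (title : Option String) (out : Option String) : Prop := out = move_article_to_end_alt title
instance (title : Option String) (out : Option String) : Decidable (Spec_move_article_to_end title out) := by unfold Spec_move_article_to_end; infer_instance

-- ===== CLAIM (what is proved, stated in full; the proofs are below) =====
def Claim_equal_move_article_to_end : Prop := ∀ (title : Option String), Dom_move_article_to_end title → Spec_move_article_to_end title (move_article_to_end title)

-- ===== LEMMAS AND PROOFS =====

theorem go_zero (fuel : Nat) (l cur : List Char) (acc : List (List Char)) :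
    PySem.Chars.splitOnMax.go [' '] fuel 0 l cur acc = ((cur.reverse ++ l) :: acc).reverse := by
  cases fuel <;> cases l <;> simp [PySem.Chars.splitOnMax.go]

theorem go_one (fuel : Nat) (l cur : List Char) (acc : List (List Char)) (h : l.length < fuel) :
    PySem.Chars.splitOnMax.go [' '] fuel 1 l cur acc =
      if ' ' ∈ l then
        ((l.dropWhile (· ≠ ' ')).tail :: (cur.reverse ++ l.takeWhile (· ≠ ' ')) :: acc).reverse
      else ((cur.reverse ++ l) :: acc).reverse := by
  induction fuel generalizing l cur acc with
  | zero => omega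
  | succ n ih =>
      cases l with
      | nil => simp [PySem.Chars.splitOnMax.go]
      | cons c rest =>
          by_cases hc : c = ' '
          · subst hc
            simp [PySem.Chars.splitOnMax.go, List.isPrefixOf, go_zero]
          · have : ([' '].isPrefixOf (c :: rest)) = false := by
              simp [List.isPrefixOf]
              exact fun h => absurd h.symm hc
            simp only [PySem.Chars.splitOnMax.go, this]
            rw [ih rest (c :: cur) acc (by simpa using Nat.lt_of_succ_lt_succ h)]
            by_cases hr : ' ' ∈ rest <;>
              simp [hc, hr, Ne.symm hc]

theorem split_one (cs : List Char) :
    PySem.Chars.splitOnMax cs [' '] 1 =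
      if ' ' ∈ cs then [cs.takeWhile (· ≠ ' '), (cs.dropWhile (· ≠ ' ')).tail] else [cs] := by
  unfold PySem.Chars.splitOnMax
  rw [if_neg (by norm_num)]
  have h1 : Int.toNat 1 = 1 := rfl
  rw [h1, go_one (cs.length + 1) cs [] [] (by omega)]
  split <;> simp

theorem prefix_of_takeWhile (q cs : List Char) (hq : ' ' ∉ q) (hm : ' ' ∈ cs)
    (ht : cs.takeWhile (fun x => !decide (x = ' ')) = q) : (q ++ [' ']) <+: cs := by
  have hsplit := List.takeWhile_append_dropWhile (p := fun x => !decide (x = ' ')) (l := cs)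
  rcases hd : cs.dropWhile (fun x => !decide (x = ' ')) with _ | ⟨d, ds⟩
  · exfalso
    have hcs : cs = q := by rw [← hsplit, hd, List.append_nil, ht]
    exact hq (hcs ▸ hm)
  · have hne : cs.dropWhile (fun x => !decide (x = ' ')) ≠ [] := by rw [hd]; simp
    have hhd := List.head_dropWhile_not (p := fun x => !decide (x = ' ')) (l := cs) hne
    have hd' : d = ' ' := by
      simp only [hd, List.head_cons] at hhd
      simpa using hhd
    refine ⟨ds, ?_⟩
    rw [← hsplit, ht, hd, hd']
    simp

-- ===== VERDICT (by name: the statement is the Claim_ definition above) =====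
theorem move_article_to_end_spec : Claim_equal_move_article_to_end := by
  intro title _
  unfold Spec_move_article_to_end move_article_to_end move_article_to_end_alt
  cases title with
  | none => rfl
  | some t =>
      by_cases ht : t = ""
      · simp [ht]
      · simp only [ht, if_false]
        have hsplit : PySem.Str.splitMax? t " " 1 =
            some ((if ' ' ∈ t.toList then
              [t.toList.takeWhile (· ≠ ' '), (t.toList.dropWhile (· ≠ ' ')).tail]
             else [t.toList]).map String.ofList) := by
          simp [PySem.Str.splitMax?, PySem.Chars.splitMax?, split_one]
        by_cases h1 : "The ".toList <+: t.toList
        · obtain ⟨r, hr⟩ := h1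
          have hcs : t.toList = ['T','h','e'] ++ ' ' :: r := by rw [← hr]; rfl
          have hstrip : PySem.Str.strip "The " = "The" := by decide
          have hfi : String.ofList ['T','h','e'] = "The" := by decide
          rw [hsplit]
          simp [moveA_loop, hcs, hstrip, hfi,
                PySem.Chars.startswith, List.isPrefixOf,
                PySem.List.slice_from, String.toList_ofList]
        · by_cases h2 : "A ".toList <+: t.toList
          · obtain ⟨r, hr⟩ := h2
            have hcs : t.toList = ['A'] ++ ' ' :: r := by rw [← hr]; rfl
            have hstrip : PySem.Str.strip "A " = "A" := by decide
            have hfi : String.ofList ['A'] = "A" := by decide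
            rw [hsplit]
            simp [moveA_loop, hcs, hstrip, hfi,
                  PySem.Chars.startswith, List.isPrefixOf,
                  PySem.List.slice_from, String.toList_ofList]
          · by_cases h3 : "An ".toList <+: t.toList
            · obtain ⟨r, hr⟩ := h3
              have hcs : t.toList = ['A','n'] ++ ' ' :: r := by rw [← hr]; rfl
              have hlen : PySem.Str.len "An " = 3 := by decide
              have hstrip : PySem.Str.strip "An " = "An" := by decide
              have hfi : String.ofList ['A','n'] = "An" := by decide
              rw [hsplit]
              simp [moveA_loop, hcs, hstrip, hfi,
                    PySem.Chars.startswith, List.isPrefixOf,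
                    PySem.List.slice_from, String.toList_ofList]
            · -- no article matches: both sides return the title unchanged
              have hc1 : PySem.Chars.startswith t.toList ['T','h','e',' '] = false := by
                rw [show (['T','h','e',' '] : List Char) = "The ".toList from rfl]
                exact (Bool.not_eq_true _).mp
                  (fun h => h1 ((PySem.Chars.startswith_iff _ _).mp h))
              have hc2 : PySem.Chars.startswith t.toList ['A',' '] = false := by
                rw [show (['A',' '] : List Char) = "A ".toList from rfl]
                exact (Bool.not_eq_true _).mp
                  (fun h => h2 ((PySem.Chars.startswith_iff _ _).mp h))
              have hc3 : PySem.Chars.startswith t.toList ['A','n',' '] = false := by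
                rw [show (['A','n',' '] : List Char) = "An ".toList from rfl]
                exact (Bool.not_eq_true _).mp
                  (fun h => h3 ((PySem.Chars.startswith_iff _ _).mp h))
              rw [hsplit]
              by_cases hsp : ' ' ∈ t.toList
              · have hno : ¬ (String.ofList (t.toList.takeWhile (fun x => !decide (x = ' '))) = "The" ∨
                    String.ofList (t.toList.takeWhile (fun x => !decide (x = ' '))) = "A" ∨
                    String.ofList (t.toList.takeWhile (fun x => !decide (x = ' '))) = "An") := by
                  rintro (hfi | hfi | hfi)
                  · have htk : t.toList.takeWhile (fun x => !decide (x = ' ')) = ['T','h','e'] := by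
                      have := congrArg String.toList hfi
                      simpa [String.toList_ofList] using this
                    exact h1 (prefix_of_takeWhile _ _ (by decide) hsp htk)
                  · have htk : t.toList.takeWhile (fun x => !decide (x = ' ')) = ['A'] := by
                      have := congrArg String.toList hfi
                      simpa [String.toList_ofList] using this
                    exact h2 (prefix_of_takeWhile _ _ (by decide) hsp htk)
                  · have htk : t.toList.takeWhile (fun x => !decide (x = ' ')) = ['A','n'] := by
                      have := congrArg String.toList hfi
                      simpa [String.toList_ofList] using this
                    exact h3 (prefix_of_takeWhile _ _ (by decide) hsp htk)
                simp [moveA_loop, hc1, hc2, hc3, hsp, hno]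
              · simp [moveA_loop, hc1, hc2, hc3, hsp,
                      String.toList_inj.mp String.toList_ofList]
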